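-- pv_equiv track=rewrite | github.com/ishans2404/pm-loading-app | backend/normalizers.py | infer_type_from_context
-- ===== SOURCE A (Python) =====
-- def infer_type_from_context(context_before: str, field_default: str) -> str:
--     upper = (context_before or "").upper()
--     labels = [
--         {"type": "OK", "pattern": "OK PLATES"},
--         {"type": "RA", "pattern": "RA PLATES"},
--         {"type": "TPI", "pattern": "TPI PLATES"},
--         {"type": "MTI", "pattern": "MTI PENDING"},
--         {"type": "DIV", "pattern": "DIV"},
--     ]
--     best = {"type": field_default, "idx": -1}
--     for item in labels:
--         idx = upper.rfind(item["pattern"])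
--         if idx > best["idx"]:
--             best = {"type": item["type"], "idx": idx}
--     return best["type"]
-- ===== SOURCE B (Python) =====
-- _TABLE = [
--     ("OK PLATES", "OK"),
--     ("RA PLATES", "RA"),
--     ("TPI PLATES", "TPI"),
--     ("MTI PENDING", "MTI"),
--     ("DIV", "DIV"),
-- ]
--
--
-- def infer_type_from_context(context_before: str, field_default: str) -> str:
--     text = (context_before or "").upper()
--     # Scan positions right-to-left and return immediately at the rightmost
--     # position where some pattern matches; no two patterns can match at the
--     # same position (their first characters are pairwise distinct).
--     for i in reversed(range(len(text))):
--         for pattern, type_name in _TABLE: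
--             if text.startswith(pattern, i):
--                 return type_name
--     return field_default
-- ===== Notes on version B (the rewrite author's own statement) =====
-- stated objective: alternative
-- what changed: Replaces the five independent rfind reverse scans plus a max-by-index loop with a single right-to-left scan over positions that returns early at the rightmost position where any pattern matches (correct because no two patterns share a first character, so no ties).
import Mathlib
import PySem

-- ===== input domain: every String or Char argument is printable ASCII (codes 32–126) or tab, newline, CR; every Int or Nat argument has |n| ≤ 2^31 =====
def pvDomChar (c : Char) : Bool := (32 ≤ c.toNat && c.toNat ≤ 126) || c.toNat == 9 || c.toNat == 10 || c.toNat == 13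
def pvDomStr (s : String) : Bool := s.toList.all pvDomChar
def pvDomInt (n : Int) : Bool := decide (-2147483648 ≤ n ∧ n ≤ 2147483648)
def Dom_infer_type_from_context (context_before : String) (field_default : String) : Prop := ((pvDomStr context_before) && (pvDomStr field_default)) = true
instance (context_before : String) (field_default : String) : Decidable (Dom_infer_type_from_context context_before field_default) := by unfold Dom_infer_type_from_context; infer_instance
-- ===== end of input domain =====

-- B replaces A's five independent rfind reverse scans + max-by-index loop with one
-- right-to-left scan over positions that returns early at the rightmost matching
-- position (alternative, similar worst-case cost).


-- ===== PORT A =====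
-- labels, as the list of (type, pattern) pairs A builds
def pvLabelsA : List (String × String) :=
  [("OK", "OK PLATES"), ("RA", "RA PLATES"), ("TPI", "TPI PLATES"),
   ("MTI", "MTI PENDING"), ("DIV", "DIV")]

def infer_type_from_context (context_before : String) (field_default : String) : String :=
  -- (context_before or "") : for a string, `x or ""` is x unless x is empty
  let upper := PySem.Str.upper (if context_before = "" then "" else context_before)
  (pvLabelsA.foldl
    (fun best item =>
      let idx := PySem.Str.rfind upper item.2
      if idx > best.2 then (item.1, idx) else best)
    (field_default, (-1 : Int))).1

-- ===== PORT B =====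
-- _TABLE, the (pattern, type) pairs B scans with
def pvTableB : List (String × String) :=
  [("OK PLATES", "OK"), ("RA PLATES", "RA"), ("TPI PLATES", "TPI"),
   ("MTI PENDING", "MTI"), ("DIV", "DIV")]

-- B's inner loop: first table entry whose pattern matches at the given position;
-- text.startswith(pattern, i) with 0 ≤ i is: pattern is a prefix of text[i:] (exact for i ≥ 0)
def pvMatchAt (s : List Char) : Option String :=
  pvTableB.findSome? (fun pt =>
    if PySem.Chars.startswith s pt.1.toList then some pt.2 else none)

-- B's outer loop `for i in reversed(range(len(text)))` with early return:
-- pvLoopB text k runs i = k-1, k-2, …, 0 (the loop indices are exactly these naturals)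
def pvLoopB (text : List Char) : Nat → Option String
  | 0 => none
  | k + 1 =>
    match pvMatchAt (text.drop k) with
    | some ty => some ty
    | none => pvLoopB text k

def infer_type_from_context_alt (context_before : String) (field_default : String) : String :=
  let text := (PySem.Str.upper (if context_before = "" then "" else context_before)).toList
  match pvLoopB text text.length with
  | some ty => ty
  | none => field_default

-- ===== PRECONDITION & SPEC =====
def Spec_infer_type_from_context (context_before : String) (field_default : String) (out : String) : Prop := out = infer_type_from_context_alt context_before field_default
instance (context_before : String) (field_default : String) (out : String) : Decidable (Spec_infer_type_from_context context_before field_default out) := by unfold Spec_infer_type_from_context; infer_instance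

-- ===== CLAIM (what is proved, stated in full; the proofs are below) =====
def Claim_equal_infer_type_from_context : Prop := ∀ (context_before : String) (field_default : String), Dom_infer_type_from_context context_before field_default → Spec_infer_type_from_context context_before field_default (infer_type_from_context context_before field_default)

-- ===== LEMMAS AND PROOFS =====

-- one step of a last-match-wins update: check the five patterns against the suffix s
def pvUpd (s : List Char) (r : String) : String :=
  pvTableB.foldl
    (fun r pt => if PySem.Chars.startswith s pt.1.toList then pt.2 else r) r

-- a left-to-right scan where the last matching position wins
def pvScan : List Char → String → String
  | [], r => r
  | c :: t, r => pvScan t (pvUpd (c :: t) r)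

-- A's fold, on a char list
def pvAcore (u : List Char) (fd : String) : String :=
  (pvLabelsA.foldl
    (fun best item =>
      let idx := PySem.Chars.rfind u item.2.toList
      if idx > best.2 then (item.1, idx) else best)
    (fd, (-1 : Int))).1

-- how one rfind value changes when a character is prepended
def pvSh (a : Int) (b : Bool) : Int := if a ≥ 0 then a + 1 else if b then 0 else -1

-- generic one-step functions: triples (type, rfind-on-t, matches-at-head)
def pvStepL (s : String × Int) (x : String × Int × Bool) : String × Int :=
  if pvSh x.2.1 x.2.2 > s.2 then (x.1, pvSh x.2.1 x.2.2) else s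
def pvStepR (s : String × Int) (x : String × Int × Bool) : String × Int :=
  if x.2.1 > s.2 then (x.1, x.2.1) else s

def pvNoB (l : List (String × Int × Bool)) : Prop := ∀ x ∈ l, x.2.2 = false
def pvAllNeg (l : List (String × Int × Bool)) : Prop := ∀ x ∈ l, x.2.1 ≤ -1

-- the invariant relating the state of A's fold on c::t (s') with its state on t (s)
def pvRel (l : List (String × Int × Bool)) (s' s : String × Int) : Prop :=
  (0 ≤ s.2 ∧ s' = (s.1, s.2 + 1))
  ∨ (s.2 = -1 ∧ -1 ≤ s'.2 ∧ s'.2 ≤ 0 ∧ (s'.2 = 0 → pvNoB l) ∧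
      ((∃ x ∈ l, 0 ≤ x.2.1)
        ∨ (pvAllNeg l ∧ ((∃ x ∈ l, x.2.2 = true ∧ x.1 = s.1) ∨ (pvNoB l ∧ s'.1 = s.1)))))

theorem pv_go_ge_neg_one (s sub : List Char) : ∀ n, -1 ≤ PySem.Chars.rfind.go s sub n := by
  intro n
  induction n with
  | zero => rw [PySem.Chars.rfind.go]; split <;> omega
  | succ j ih => rw [PySem.Chars.rfind.go]; split <;> [omega; exact ih]

theorem pv_rfind_ge_neg_one (s sub : List Char) : -1 ≤ PySem.Chars.rfind s sub :=
  pv_go_ge_neg_one s sub s.length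

theorem pv_go_cons (c : Char) (t sub : List Char) : ∀ n : Nat,
    PySem.Chars.rfind.go (c :: t) sub (n + 1)
      = if PySem.Chars.rfind.go t sub n ≥ 0 then PySem.Chars.rfind.go t sub n + 1
        else if sub.isPrefixOf (c :: t) then 0 else -1 := by
  intro n
  induction n with
  | zero =>
      rw [PySem.Chars.rfind.go, PySem.Chars.rfind.go, PySem.Chars.rfind.go]
      simp only [List.drop_succ_cons, List.drop_zero]
      split_ifs <;> simp_all
  | succ j ih =>
      rw [PySem.Chars.rfind.go]
      conv_rhs => rw [PySem.Chars.rfind.go]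
      simp only [List.drop_succ_cons]
      have hge := pv_go_ge_neg_one t sub j
      split_ifs with h1 h2 h3 h4 <;> simp_all <;> omega

theorem pv_rfind_cons (c : Char) (t sub : List Char) :
    PySem.Chars.rfind (c :: t) sub
      = pvSh (PySem.Chars.rfind t sub) (sub.isPrefixOf (c :: t)) := by
  show PySem.Chars.rfind.go (c :: t) sub (c :: t).length = _
  simp only [List.length_cons]
  rw [pv_go_cons c t sub t.length]
  rfl

-- the one induction that relates A's fold on c::t with A's fold on t
theorem pv_gen : ∀ (l : List (String × Int × Bool)) (s' s : String × Int),
    (∀ x ∈ l, -1 ≤ x.2.1) → l.countP (fun x => x.2.2) ≤ 1 → pvRel l s' s →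
    (l.foldl pvStepL s').1 = (l.foldl pvStepR s).1 := by
  intro l
  induction l with
  | nil =>
      intro s' s _ _ hrel
      rcases hrel with ⟨_, rfl⟩ | ⟨_, _, _, _, hd⟩
      · rfl
      · rcases hd with ⟨x, hx, _⟩ | ⟨_, ⟨x, hx, _⟩ | ⟨_, heq⟩⟩
        · cases hx
        · cases hx
        · exact heq
  | cons x rest ih =>
      rintro s' s hval hcount hrel
      obtain ⟨ty, a, b⟩ := x
      have hva : -1 ≤ a := hval (ty, a, b) (by simp)
      have hvr : ∀ y ∈ rest, -1 ≤ y.2.1 := fun y hy => hval y (by simp [hy])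
      rw [List.countP_cons] at hcount
      simp only [List.foldl_cons]
      refine ih _ _ hvr (by omega) ?_
      rcases hrel with ⟨hs2, hseq⟩ | ⟨hs2, hsl, hsr, hz, hdisj⟩
      · -- synced-high state
        subst hseq
        by_cases hA : a ≥ 0
        · simp only [pvStepL, pvStepR, pvSh, if_pos hA]
          by_cases hgt : a > s.2
          · rw [if_pos (by simpa using by omega : a + 1 > (s.1, s.2 + 1).2), if_pos hgt]
            exact Or.inl ⟨by omega, rfl⟩
          · rw [if_neg (by simpa using by omega : ¬ a + 1 > (s.1, s.2 + 1).2), if_neg hgt]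
            exact Or.inl ⟨hs2, rfl⟩
        · simp only [pvStepL, pvStepR, pvSh, if_neg hA]
          rw [if_neg (by cases b <;> simp <;> omega), if_neg (by omega)]
          exact Or.inl ⟨hs2, rfl⟩
      · -- desynced state, s.2 = -1
        have hz' : s'.2 = 0 → pvNoB rest := fun h y hy => hz h y (by simp [hy])
        by_cases hA : a ≥ 0
        · simp only [pvStepL, pvStepR, pvSh, if_pos hA]
          rw [if_pos (by omega), if_pos (by omega)]
          exact Or.inl ⟨by simpa using hA, by simp⟩
        · have ha' : a = -1 := by omega
          subst ha'
          cases b with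
          | false =>
              have hLs : pvStepL s' (ty, -1, false) = s' := by
                show (if (-1 : Int) > s'.2 then (ty, (-1 : Int)) else s') = s'
                exact if_neg (by omega)
              have hRs : pvStepR s (ty, -1, false) = s := by
                show (if (-1 : Int) > s.2 then (ty, (-1 : Int)) else s) = s
                exact if_neg (by omega)
              rw [hLs, hRs]
              refine Or.inr ⟨hs2, hsl, hsr, hz', ?_⟩
              rcases hdisj with ⟨y, hy, hy0⟩ | ⟨hneg, hin⟩
              · rcases List.mem_cons.mp hy with hy' | hy'
                · rw [hy'] at hy0; simp at hy0
                · exact Or.inl ⟨y, hy', hy0⟩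
              · refine Or.inr ⟨fun y hy => hneg y (by simp [hy]), ?_⟩
                rcases hin with ⟨y, hy, hyb, hy1⟩ | ⟨hnob, heq⟩
                · rcases List.mem_cons.mp hy with hy' | hy'
                  · rw [hy'] at hyb; simp at hyb
                  · exact Or.inl ⟨y, hy', hyb, hy1⟩
                · exact Or.inr ⟨fun y hy => hnob y (by simp [hy]), heq⟩
          | true =>
              have hcz : rest.countP (fun x => x.2.2) = 0 := by
                have hone : (if ((ty, (-1 : Int), true).2.2 = true) then 1 else 0) = 1 :=
                  if_pos rfl
                rw [hone] at hcount
                omega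
              have hnobr : pvNoB rest := by
                intro y hy
                have := List.countP_eq_zero.mp hcz y hy
                simpa using this
              have hsz : s'.2 = -1 := by
                by_contra hne
                have h0 : s'.2 = 0 := by omega
                have := hz h0 (ty, -1, true) (by simp)
                simp at this
              have hLs : pvStepL s' (ty, -1, true) = (ty, (0 : Int)) := by
                show (if (0 : Int) > s'.2 then (ty, (0 : Int)) else s') = (ty, (0 : Int))
                exact if_pos (by omega)
              have hRs : pvStepR s (ty, -1, true) = s := by
                show (if (-1 : Int) > s.2 then (ty, (-1 : Int)) else s) = s
                exact if_neg (by omega)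
              rw [hLs, hRs]
              refine Or.inr ⟨hs2, by norm_num, by norm_num, fun _ => hnobr, ?_⟩
              rcases hdisj with ⟨y, hy, hy0⟩ | ⟨hneg, hin⟩
              · rcases List.mem_cons.mp hy with hy' | hy'
                · rw [hy'] at hy0; simp at hy0
                · exact Or.inl ⟨y, hy', hy0⟩
              · refine Or.inr ⟨fun y hy => hneg y (by simp [hy]), ?_⟩
                rcases hin with ⟨y, hy, hyb, hy1⟩ | ⟨hnob, _⟩
                · rcases List.mem_cons.mp hy with hy' | hy'
                  · refine Or.inr ⟨hnobr, ?_⟩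
                    rw [hy'] at hy1
                    simpa using hy1
                  · exfalso
                    have := hnobr y hy'
                    rw [this] at hyb
                    cases hyb
                · exfalso
                  have := hnob (ty, -1, true) (by simp)
                  simp at this

-- package one label as a triple (type, rfind on t, matches at head of c::t)
def pvG (c : Char) (t : List Char) (it : String × String) : String × Int × Bool :=
  (it.1, PySem.Chars.rfind t it.2.toList, it.2.toList.isPrefixOf (c :: t))

theorem pv_prefO (c : Char) (t : List Char) :
    ("OK PLATES".toList).isPrefixOf (c :: t) = true → c = 'O' := by
  rw [show "OK PLATES".toList = 'O' :: "K PLATES".toList from rfl]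
  intro h; simp [List.isPrefixOf] at h; exact h.1.symm

theorem pv_prefR (c : Char) (t : List Char) :
    ("RA PLATES".toList).isPrefixOf (c :: t) = true → c = 'R' := by
  rw [show "RA PLATES".toList = 'R' :: "A PLATES".toList from rfl]
  intro h; simp [List.isPrefixOf] at h; exact h.1.symm

theorem pv_prefT (c : Char) (t : List Char) :
    ("TPI PLATES".toList).isPrefixOf (c :: t) = true → c = 'T' := by
  rw [show "TPI PLATES".toList = 'T' :: "PI PLATES".toList from rfl]
  intro h; simp [List.isPrefixOf] at h; exact h.1.symm

theorem pv_prefM (c : Char) (t : List Char) :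
    ("MTI PENDING".toList).isPrefixOf (c :: t) = true → c = 'M' := by
  rw [show "MTI PENDING".toList = 'M' :: "TI PENDING".toList from rfl]
  intro h; simp [List.isPrefixOf] at h; exact h.1.symm

theorem pv_prefD (c : Char) (t : List Char) :
    ("DIV".toList).isPrefixOf (c :: t) = true → c = 'D' := by
  rw [show "DIV".toList = 'D' :: "IV".toList from rfl]
  intro h; simp [List.isPrefixOf] at h; exact h.1.symm

-- the five-way last-match-wins update, written out (definitional unfolding of the fold)
theorem pv_upd_eq (s : List Char) (r : String) :
    pvUpd s r
      = if ("DIV".toList).isPrefixOf s then "DIV"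
        else if ("MTI PENDING".toList).isPrefixOf s then "MTI"
        else if ("TPI PLATES".toList).isPrefixOf s then "TPI"
        else if ("RA PLATES".toList).isPrefixOf s then "RA"
        else if ("OK PLATES".toList).isPrefixOf s then "OK"
        else r := rfl

theorem pv_acore_step (c : Char) (t : List Char) (fd : String) :
    pvAcore (c :: t) fd = pvAcore t (pvUpd (c :: t) fd) := by
  have e1 := pv_prefO c t
  have e2 := pv_prefR c t
  have e3 := pv_prefT c t
  have e4 := pv_prefM c t
  have e5 := pv_prefD c t
  have hfunL : (fun (best : String × Int) (item : String × String) =>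
        let idx := PySem.Chars.rfind (c :: t) item.2.toList
        if idx > best.2 then (item.1, idx) else best)
      = (fun s itm => pvStepL s (pvG c t itm)) := by
    funext s itm
    simp only [pvStepL, pvG, pv_rfind_cons]
  have hfunR : ∀ r : String,
      (fun (best : String × Int) (item : String × String) =>
        let idx := PySem.Chars.rfind t item.2.toList
        if idx > best.2 then (item.1, idx) else best)
      = (fun s itm => pvStepR s (pvG c t itm)) := by
    intro r
    funext s itm
    simp only [pvStepR, pvG]
  have hboth : pvAcore (c :: t) fd
      = ((pvLabelsA.map (pvG c t)).foldl pvStepL (fd, (-1 : Int))).1 := by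
    unfold pvAcore
    rw [hfunL, ← List.foldl_map]
  have hright : pvAcore t (pvUpd (c :: t) fd)
      = ((pvLabelsA.map (pvG c t)).foldl pvStepR (pvUpd (c :: t) fd, (-1 : Int))).1 := by
    unfold pvAcore
    rw [hfunR fd, ← List.foldl_map]
  rw [hboth, hright]
  apply pv_gen
  · intro x hx
    simp only [pvLabelsA, pvG, List.map_cons, List.map_nil] at hx
    fin_cases hx <;> exact pv_rfind_ge_neg_one _ _
  · -- at most one of the five head matches
    by_cases b1 : ("OK PLATES".toList).isPrefixOf (c :: t) = true <;>
    by_cases b2 : ("RA PLATES".toList).isPrefixOf (c :: t) = true <;>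
    by_cases b3 : ("TPI PLATES".toList).isPrefixOf (c :: t) = true <;>
    by_cases b4 : ("MTI PENDING".toList).isPrefixOf (c :: t) = true <;>
    by_cases b5 : ("DIV".toList).isPrefixOf (c :: t) = true <;>
      first
        | exact absurd ((e1 b1).symm.trans (e2 b2)) (by decide)
        | exact absurd ((e1 b1).symm.trans (e3 b3)) (by decide)
        | exact absurd ((e1 b1).symm.trans (e4 b4)) (by decide)
        | exact absurd ((e1 b1).symm.trans (e5 b5)) (by decide)
        | exact absurd ((e2 b2).symm.trans (e3 b3)) (by decide)
        | exact absurd ((e2 b2).symm.trans (e4 b4)) (by decide)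
        | exact absurd ((e2 b2).symm.trans (e5 b5)) (by decide)
        | exact absurd ((e3 b3).symm.trans (e4 b4)) (by decide)
        | exact absurd ((e3 b3).symm.trans (e5 b5)) (by decide)
        | exact absurd ((e4 b4).symm.trans (e5 b5)) (by decide)
        | (clear hfunL hfunR hboth hright
           simp only [pvLabelsA, pvG, List.map_cons, List.map_nil, List.countP_cons,
             List.countP_nil]
           split_ifs <;> simp_all)
  · -- establish the initial invariant
    refine Or.inr ⟨rfl, by simp, by simp, fun h => absurd h (by norm_num), ?_⟩
    by_cases hpos :
        0 ≤ PySem.Chars.rfind t ['O', 'K', ' ', 'P', 'L', 'A', 'T', 'E', 'S']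
      ∨ 0 ≤ PySem.Chars.rfind t ['R', 'A', ' ', 'P', 'L', 'A', 'T', 'E', 'S']
      ∨ 0 ≤ PySem.Chars.rfind t ['T', 'P', 'I', ' ', 'P', 'L', 'A', 'T', 'E', 'S']
      ∨ 0 ≤ PySem.Chars.rfind t ['M', 'T', 'I', ' ', 'P', 'E', 'N', 'D', 'I', 'N', 'G']
      ∨ 0 ≤ PySem.Chars.rfind t ['D', 'I', 'V']
    · left
      rcases hpos with h | h | h | h | h
      · exact ⟨pvG c t ("OK", "OK PLATES"), by simp [pvLabelsA], by simpa [pvG] using h⟩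
      · exact ⟨pvG c t ("RA", "RA PLATES"), by simp [pvLabelsA], by simpa [pvG] using h⟩
      · exact ⟨pvG c t ("TPI", "TPI PLATES"), by simp [pvLabelsA], by simpa [pvG] using h⟩
      · exact ⟨pvG c t ("MTI", "MTI PENDING"), by simp [pvLabelsA], by simpa [pvG] using h⟩
      · exact ⟨pvG c t ("DIV", "DIV"), by simp [pvLabelsA], by simpa [pvG] using h⟩
    · push_neg at hpos
      obtain ⟨h1, h2, h3, h4, h5⟩ := hpos
      refine Or.inr ⟨?_, ?_⟩
      · intro x hx
        simp only [pvLabelsA, pvG, List.map_cons, List.map_nil] at hx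
        fin_cases hx <;> simp <;> omega
      · -- pick the unique matching pattern (if any) and compute pvUpd accordingly
        rw [pv_upd_eq]
        by_cases b5 : ("DIV".toList).isPrefixOf (c :: t) = true
        · rw [if_pos b5]
          exact Or.inl ⟨pvG c t ("DIV", "DIV"), by simp [pvLabelsA], by simpa [pvG] using b5, rfl⟩
        · rw [if_neg (by simpa using b5)]
          by_cases b4 : ("MTI PENDING".toList).isPrefixOf (c :: t) = true
          · rw [if_pos b4]
            exact Or.inl ⟨pvG c t ("MTI", "MTI PENDING"), by simp [pvLabelsA], by simpa [pvG] using b4, rfl⟩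
          · rw [if_neg (by simpa using b4)]
            by_cases b3 : ("TPI PLATES".toList).isPrefixOf (c :: t) = true
            · rw [if_pos b3]
              exact Or.inl ⟨pvG c t ("TPI", "TPI PLATES"), by simp [pvLabelsA], by simpa [pvG] using b3, rfl⟩
            · rw [if_neg (by simpa using b3)]
              by_cases b2 : ("RA PLATES".toList).isPrefixOf (c :: t) = true
              · rw [if_pos b2]
                exact Or.inl ⟨pvG c t ("RA", "RA PLATES"), by simp [pvLabelsA], by simpa [pvG] using b2, rfl⟩
              · rw [if_neg (by simpa using b2)]
                by_cases b1 : ("OK PLATES".toList).isPrefixOf (c :: t) = true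
                · rw [if_pos b1]
                  exact Or.inl ⟨pvG c t ("OK", "OK PLATES"), by simp [pvLabelsA], by simpa [pvG] using b1, rfl⟩
                · rw [if_neg (by simpa using b1)]
                  refine Or.inr ⟨?_, rfl⟩
                  intro x hx
                  simp only [pvLabelsA, pvG, List.map_cons, List.map_nil] at hx
                  fin_cases hx <;>
                    first
                      | exact Bool.eq_false_iff.mpr b1
                      | exact Bool.eq_false_iff.mpr b2
                      | exact Bool.eq_false_iff.mpr b3
                      | exact Bool.eq_false_iff.mpr b4
                      | exact Bool.eq_false_iff.mpr b5

theorem pv_rfind_nil (sub : List Char) :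
    PySem.Chars.rfind [] sub = if sub.isPrefixOf [] then 0 else -1 := by
  show PySem.Chars.rfind.go [] sub 0 = _
  rw [PySem.Chars.rfind.go]

theorem pv_acore_eq_scan (u : List Char) : ∀ fd : String, pvAcore u fd = pvScan u fd := by
  induction u with
  | nil =>
      intro fd
      simp [pvAcore, pvScan, pvLabelsA, pv_rfind_nil]
  | cons c t ih =>
      intro fd
      rw [pv_acore_step, pvScan, ih]

-- pvMatchAt written out as the if-chain in table order (first match wins)
theorem pv_match_eq (s : List Char) :
    pvMatchAt s
      = if ("OK PLATES".toList).isPrefixOf s then some "OK"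
        else if ("RA PLATES".toList).isPrefixOf s then some "RA"
        else if ("TPI PLATES".toList).isPrefixOf s then some "TPI"
        else if ("MTI PENDING".toList).isPrefixOf s then some "MTI"
        else if ("DIV".toList).isPrefixOf s then some "DIV"
        else none := by
  simp only [pvMatchAt, pvTableB, List.findSome?_cons, List.findSome?_nil,
    PySem.Chars.startswith]
  split_ifs <;> rfl

-- at a fixed position the last-match-wins update agrees with the first-match search,
-- because at most one pattern can match there (distinct first characters)
theorem pv_upd_getD (c : Char) (t : List Char) (r : String) :
    pvUpd (c :: t) r = (pvMatchAt (c :: t)).getD r := by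
  have e1 := pv_prefO c t
  have e2 := pv_prefR c t
  have e3 := pv_prefT c t
  have e4 := pv_prefM c t
  have e5 := pv_prefD c t
  rw [pv_upd_eq, pv_match_eq]
  by_cases b1 : ("OK PLATES".toList).isPrefixOf (c :: t) = true
  · have n2 : ¬ ("RA PLATES".toList).isPrefixOf (c :: t) = true :=
      fun h => absurd ((e1 b1).symm.trans (e2 h)) (by decide)
    have n3 : ¬ ("TPI PLATES".toList).isPrefixOf (c :: t) = true :=
      fun h => absurd ((e1 b1).symm.trans (e3 h)) (by decide)
    have n4 : ¬ ("MTI PENDING".toList).isPrefixOf (c :: t) = true :=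
      fun h => absurd ((e1 b1).symm.trans (e4 h)) (by decide)
    have n5 : ¬ ("DIV".toList).isPrefixOf (c :: t) = true :=
      fun h => absurd ((e1 b1).symm.trans (e5 h)) (by decide)
    simp only [if_pos b1, if_neg n2, if_neg n3, if_neg n4, if_neg n5, Option.getD_some]
  · by_cases b2 : ("RA PLATES".toList).isPrefixOf (c :: t) = true
    · have n3 : ¬ ("TPI PLATES".toList).isPrefixOf (c :: t) = true :=
        fun h => absurd ((e2 b2).symm.trans (e3 h)) (by decide)
      have n4 : ¬ ("MTI PENDING".toList).isPrefixOf (c :: t) = true :=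
        fun h => absurd ((e2 b2).symm.trans (e4 h)) (by decide)
      have n5 : ¬ ("DIV".toList).isPrefixOf (c :: t) = true :=
        fun h => absurd ((e2 b2).symm.trans (e5 h)) (by decide)
      simp only [if_pos b2, if_neg b1, if_neg n3, if_neg n4, if_neg n5, Option.getD_some]
    · by_cases b3 : ("TPI PLATES".toList).isPrefixOf (c :: t) = true
      · have n4 : ¬ ("MTI PENDING".toList).isPrefixOf (c :: t) = true :=
          fun h => absurd ((e3 b3).symm.trans (e4 h)) (by decide)
        have n5 : ¬ ("DIV".toList).isPrefixOf (c :: t) = true :=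
          fun h => absurd ((e3 b3).symm.trans (e5 h)) (by decide)
        simp only [if_pos b3, if_neg b1, if_neg b2, if_neg n4, if_neg n5, Option.getD_some]
      · by_cases b4 : ("MTI PENDING".toList).isPrefixOf (c :: t) = true
        · have n5 : ¬ ("DIV".toList).isPrefixOf (c :: t) = true :=
            fun h => absurd ((e4 b4).symm.trans (e5 h)) (by decide)
          simp only [if_pos b4, if_neg b1, if_neg b2, if_neg b3, if_neg n5, Option.getD_some]
        · by_cases b5 : ("DIV".toList).isPrefixOf (c :: t) = true
          · simp only [if_pos b5, if_neg b1, if_neg b2, if_neg b3, if_neg b4, Option.getD_some]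
          · simp only [if_neg b1, if_neg b2, if_neg b3, if_neg b4, if_neg b5, Option.getD_none]

-- peeling the head: B's descending loop on c::t over indices k..0 is its loop on t
-- over indices k-1..0, followed by the check at position 0
theorem pv_loop_cons (c : Char) (t : List Char) : ∀ k : Nat,
    pvLoopB (c :: t) (k + 1)
      = match pvLoopB t k with
        | some ty => some ty
        | none => pvMatchAt (c :: t) := by
  intro k
  induction k with
  | zero =>
      show (match pvMatchAt ((c :: t).drop 0) with
            | some ty => some ty
            | none => pvLoopB (c :: t) 0) = _
      simp only [List.drop_zero, pvLoopB]
      cases pvMatchAt (c :: t) <;> rfl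
  | succ m ih =>
      show (match pvMatchAt ((c :: t).drop (m + 1)) with
            | some ty => some ty
            | none => pvLoopB (c :: t) (m + 1)) = _
      rw [List.drop_succ_cons, ih]
      show _ = (match (match pvMatchAt (t.drop m) with
                       | some ty => some ty
                       | none => pvLoopB t m) with
                | some ty => some ty
                | none => pvMatchAt (c :: t))
      cases pvMatchAt (t.drop m) <;> [rfl; rfl]

-- the left-to-right last-match-wins scan equals the right-to-left first-match loop
theorem pv_scan_loop (u : List Char) : ∀ fd : String,
    pvScan u fd = (pvLoopB u u.length).getD fd := by
  induction u with
  | nil => intro fd; rfl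
  | cons c t ih =>
      intro fd
      rw [pvScan, ih, pv_upd_getD, List.length_cons, pv_loop_cons]
      cases pvLoopB t t.length <;> cases pvMatchAt (c :: t) <;> rfl

-- ===== VERDICT (by name: the statement is the Claim_ definition above) =====
theorem infer_type_from_context_spec : Claim_equal_infer_type_from_context := by
  intro cb fd _
  show _ = _
  have hA : infer_type_from_context cb fd
      = pvAcore (PySem.Str.upper (if cb = "" then "" else cb)).toList fd := by
    simp only [infer_type_from_context, pvAcore, PySem.Str.rfind_eq]
  have hB : infer_type_from_context_alt cb fd
      = (pvLoopB (PySem.Str.upper (if cb = "" then "" else cb)).toList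
          (PySem.Str.upper (if cb = "" then "" else cb)).toList.length).getD fd := by
    simp only [infer_type_from_context_alt]
    cases h : pvLoopB (PySem.Str.upper (if cb = "" then "" else cb)).toList
        (PySem.Str.upper (if cb = "" then "" else cb)).toList.length <;> simp only [h, Option.getD_some, Option.getD_none]
  rw [hA, hB, pv_acore_eq_scan, pv_scan_loop]
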